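-- pv_equiv track=rewrite | github.com/whorishabhverma/python_basics | important_codes_only/practice_question_4.py | frogs_and_flies
-- ===== SOURCE A (Python) =====
-- def frogs_and_flies(frog_positions, tongue_sizes, fly_positions):
--     # Initialize the result list with empty lists for each frog
--     result = [[] for _ in frog_positions]
--
--     for i in range(len(frog_positions)):
--         xi = frog_positions[i]
--         si = tongue_sizes[i]
--         for fly in fly_positions:
--             # If the fly is within the frog's reach
--             if abs(xi - fly) <= si:
--                 result[i].append(fly)
--
--     return result
-- ===== SOURCE B (Python) =====
-- def frogs_and_flies(frog_positions, tongue_sizes, fly_positions):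
--     # Sort flies (with original indices) by position once; answer each frog
--     # with two binary searches for the interval [x-s, x+s], then restore the
--     # original fly order by re-sorting the hit slice on its index.
--     es = sorted(enumerate(fly_positions), key=lambda t: t[1])
--
--     def bound(pred):
--         # first index whose value makes pred False (pred is downward closed)
--         lo, hi = 0, len(es)
--         while lo < hi:
--             mid = (lo + hi) // 2
--             if pred(es[mid][1]):
--                 lo = mid + 1
--             else:
--                 hi = mid
--         return lo
--
--     result = []
--     for x, s in zip(frog_positions, tongue_sizes):
--         lo = bound(lambda v: v < x - s)
--         hi = bound(lambda v: v <= x + s)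
--         hits = sorted(es[lo:hi], key=lambda t: t[0])
--         result.append([v for _, v in hits])
--     return result
-- ===== Notes on version B (the rewrite author's own statement) =====
-- stated objective: alternative
-- what changed: B sorts the flies (with original indices) by position once, answers each frog with two hand-written binary searches giving the slice of flies inside [x-s,x+s], and re-sorts each hit slice by original index, replacing A's full scan of all flies per frog.
import Mathlib
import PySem

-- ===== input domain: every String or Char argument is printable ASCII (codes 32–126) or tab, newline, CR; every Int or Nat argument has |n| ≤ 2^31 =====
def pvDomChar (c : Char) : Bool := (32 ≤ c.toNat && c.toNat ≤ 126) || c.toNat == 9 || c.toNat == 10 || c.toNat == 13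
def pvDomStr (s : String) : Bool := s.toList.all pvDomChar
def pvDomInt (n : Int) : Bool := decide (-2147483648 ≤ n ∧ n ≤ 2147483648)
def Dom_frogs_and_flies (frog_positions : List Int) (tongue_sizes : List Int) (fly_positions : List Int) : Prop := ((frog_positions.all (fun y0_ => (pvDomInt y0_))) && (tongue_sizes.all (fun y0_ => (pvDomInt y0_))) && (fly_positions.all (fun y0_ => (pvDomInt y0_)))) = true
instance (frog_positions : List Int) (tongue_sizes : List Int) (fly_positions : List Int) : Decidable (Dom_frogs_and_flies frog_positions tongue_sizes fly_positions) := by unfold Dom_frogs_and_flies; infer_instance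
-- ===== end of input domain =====

-- B sorts the flies once and answers each frog by binary search on the interval [x-s, x+s] — objective: alternative.

-- ===== PORT A =====
-- A: result = [[] for _ in frog_positions]; for i in range(len(frog_positions)): xi, si = …[i];
--    for fly in fly_positions: if abs(xi - fly) <= si: result[i].append(fly)
def frogs_and_flies (frog_positions : List Int) (tongue_sizes : List Int) (fly_positions : List Int) : List (List Int) :=
  let init : List (List Int) := frog_positions.map (fun _ => [])
  (PySem.List.pyRange 0 frog_positions.length 1).foldl (fun res i =>
    match PySem.List.pyGet? frog_positions i, PySem.List.pyGet? tongue_sizes i with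
    | some xi, some si =>
        -- i comes from range(len(frog_positions)), so 0 ≤ i here and i.toNat is exact
        res.set i.toNat
          (fly_positions.foldl (fun l fly => if |xi - fly| ≤ si then l ++ [fly] else l)
            (res.getD i.toNat []))
    | _, _ => res   -- IndexError in Python (tongue_sizes too short); excluded by Pre_
  ) init

-- ===== PORT B =====
-- Source B's helper bound(pred): while lo < hi: mid = (lo+hi)//2; if pred(es[mid][1]): lo = mid+1 else hi = mid.
-- lo, hi stay in 0..len(es), so Python's // on nonnegative ints is Nat division and es[mid] is the
-- in-range element (the getD default is never read for mid < es.length, which the loop maintains).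
-- (the fuel argument only bounds the number of iterations — the gap hi - lo shrinks every round,
-- so fuel = len(es) never runs out; it makes the recursion structural)
def pvBoundGo (es : List (Int × Int)) (p : Int → Bool) : Nat → Nat → Nat → Nat
  | 0, lo, _ => lo
  | fuel + 1, lo, hi =>
    if lo < hi then
      let mid := (lo + hi) / 2
      if p (es.getD mid (0, 0)).2 then pvBoundGo es p fuel (mid + 1) hi else pvBoundGo es p fuel lo mid
    else lo

-- B: es = sorted(enumerate(fly_positions), key=value); per frog two binary searches, slice,
--    re-sort the slice by original index, emit the values.
def frogs_and_flies_alt (frog_positions : List Int) (tongue_sizes : List Int) (fly_positions : List Int) : List (List Int) :=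
  let es := PySem.List.sorted (PySem.List.enumerate fly_positions 0) (fun t => t.2) false
  (frog_positions.zip tongue_sizes).foldl (fun result p =>
    let lo := pvBoundGo es (fun v => decide (v < p.1 - p.2)) es.length 0 es.length
    let hi := pvBoundGo es (fun v => decide (v ≤ p.1 + p.2)) es.length 0 es.length
    let hits := PySem.List.sorted (PySem.List.slice es (some (lo : Int)) (some (hi : Int))) (fun t => t.1) false
    result ++ [hits.map (fun t => t.2)]) []

-- ===== PRECONDITION & SPEC =====
-- A indexes tongue_sizes[i] for every i < len(frog_positions); Pre_ excludes exactly the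
-- inputs where that raises IndexError (tongue_sizes shorter than frog_positions).
def Pre_frogs_and_flies (frog_positions : List Int) (tongue_sizes : List Int) (fly_positions : List Int) : Prop :=
  frog_positions.length ≤ tongue_sizes.length
instance (frog_positions : List Int) (tongue_sizes : List Int) (fly_positions : List Int) : Decidable (Pre_frogs_and_flies frog_positions tongue_sizes fly_positions) := by unfold Pre_frogs_and_flies; infer_instance
def pvWitness_frogs_and_flies : List Int × List Int × List Int := ([0, 10], [2, 3], [1, 5, 12])

def Spec_frogs_and_flies (frog_positions : List Int) (tongue_sizes : List Int) (fly_positions : List Int) (out : List (List Int)) : Prop := out = frogs_and_flies_alt frog_positions tongue_sizes fly_positions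
instance (frog_positions : List Int) (tongue_sizes : List Int) (fly_positions : List Int) (out : List (List Int)) : Decidable (Spec_frogs_and_flies frog_positions tongue_sizes fly_positions out) := by unfold Spec_frogs_and_flies; infer_instance

-- ===== CLAIM (what is proved, stated in full; the proofs are below) =====
def Claim_equal_frogs_and_flies : Prop := ∀ (frog_positions : List Int) (tongue_sizes : List Int) (fly_positions : List Int), Dom_frogs_and_flies frog_positions tongue_sizes fly_positions → Pre_frogs_and_flies frog_positions tongue_sizes fly_positions → Spec_frogs_and_flies frog_positions tongue_sizes fly_positions (frogs_and_flies frog_positions tongue_sizes fly_positions)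

-- ===== LEMMAS AND PROOFS =====

-- A's outer fold, slot by slot
lemma A_fold (fp ts fl : List Int) (h : fp.length ≤ ts.length) (n : ℕ) (hn : n ≤ fp.length) :
    (PySem.List.pyRange 0 (n : Int) 1).foldl (fun res i =>
      match PySem.List.pyGet? fp i, PySem.List.pyGet? ts i with
      | some xi, some si =>
          res.set i.toNat
            (fl.foldl (fun l fly => if |xi - fly| ≤ si then l ++ [fly] else l)
              (res.getD i.toNat []))
      | _, _ => res) (fp.map (fun _ => []))
      = ((fp.zip ts).take n).map (fun p => fl.filter (fun fly => decide (|p.1 - fly| ≤ p.2)))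
        ++ (fp.map (fun _ => ([] : List Int))).drop n := by
  induction n with
  | zero => simp
  | succ n ih =>
      have hn' : n ≤ fp.length := Nat.le_of_succ_le hn
      have hnf : n < fp.length := hn
      have hnt : n < ts.length := lt_of_lt_of_le hnf h
      have hzl : (fp.zip ts).length = fp.length := by
        simp [List.length_zip]; omega
      have hr : PySem.List.pyRange 0 ((n + 1 : ℕ) : Int) 1
          = PySem.List.pyRange 0 (n : Int) 1 ++ [(n : Int)] := by
        push_cast
        exact PySem.List.pyRange_one_succ_right (by positivity)
      rw [hr, List.foldl_append, ih hn']
      simp only [List.foldl_cons, List.foldl_nil]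
      rw [PySem.List.pyGet?_natCast fp n, PySem.List.pyGet?_natCast ts n]
      simp only [List.getElem?_eq_getElem hnf, List.getElem?_eq_getElem hnt]
      have hlen1 : (((fp.zip ts).take n).map (fun p => fl.filter (fun fly => decide (|p.1 - fly| ≤ p.2)))).length = n := by
        simp [hzl]; omega
      have htn : (n : Int).toNat = n := by simp
      have hdrop : (fp.map (fun _ => ([] : List Int))).drop n
          = ([] : List Int) :: (fp.map (fun _ => ([] : List Int))).drop (n + 1) := by
        rw [List.drop_eq_getElem_cons (by simpa using hnf)]
        simp
      have hgetD : (((fp.zip ts).take n).map (fun p => fl.filter (fun fly => decide (|p.1 - fly| ≤ p.2)))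
            ++ (fp.map (fun _ => ([] : List Int))).drop n).getD n [] = ([] : List Int) := by
        rw [hdrop, List.getD_eq_getElem?_getD, List.getElem?_append_right (by omega), hlen1]
        simp
      rw [htn, hgetD]
      rw [PySem.List.foldl_append_ite_eq_filter]
      simp only [List.nil_append]
      rw [hdrop]
      have hset : ∀ (l1 : List (List Int)) (v w : List Int) (l2 : List (List Int)), l1.length = n →
          (l1 ++ v :: l2).set n w = l1 ++ w :: l2 := by
        intro l1 v w l2 hl
        rw [List.set_append_right _ _ (by omega), hl]
        simp
      rw [hset _ _ _ _ hlen1]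
      have htake : (fp.zip ts).take (n + 1) = (fp.zip ts).take n ++ [(fp.zip ts)[n]'(by omega)] := by
        rw [← List.take_concat_get (h := by omega)]
        simp
      rw [htake]
      simp [List.getElem_zip]

lemma A_char (fp ts fl : List Int) (h : fp.length ≤ ts.length) :
    frogs_and_flies fp ts fl
      = (fp.zip ts).map (fun p => fl.filter (fun fly => decide (|p.1 - fly| ≤ p.2))) := by
  unfold frogs_and_flies
  have := A_fold fp ts fl h fp.length le_rfl
  simp only at this
  rw [this]
  have hzl : (fp.zip ts).length = fp.length := by simp [List.length_zip]; omega
  simp [List.take_of_length_le (le_of_eq hzl)]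

-- the binary-search loop finds the boundary of a downward-closed predicate
lemma pvBoundGo_go (es : List (Int × Int)) (p : Int → Bool) (fuel lo hi : Nat)
    (hfuel : hi - lo ≤ fuel) (hhi : hi ≤ es.length) (hlo : lo ≤ hi)
    (hl : ∀ k, k < lo → ∀ (hk : k < es.length), p (es[k]'hk).2 = true)
    (hr : ∀ k, hi ≤ k → ∀ (hk : k < es.length), p (es[k]'hk).2 = false)
    (hmono : ∀ i j : Nat, i ≤ j → ∀ (hi' : i < es.length) (hj : j < es.length),
      p (es[j]'hj).2 = true → p (es[i]'hi').2 = true) :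
    pvBoundGo es p fuel lo hi ≤ es.length ∧
      ∀ k, ∀ (hk : k < es.length), (p (es[k]'hk).2 = true ↔ k < pvBoundGo es p fuel lo hi) := by
  induction fuel generalizing lo hi with
  | zero =>
      have : lo = hi := by omega
      subst this
      simp only [pvBoundGo]
      refine ⟨by omega, fun k hk => ?_⟩
      by_cases hkl : k < lo
      · simp [hl k hkl hk, hkl]
      · simp [hr k (by omega) hk, hkl]
  | succ fuel ih =>
      by_cases h : lo < hi
      · simp only [pvBoundGo, h, if_true]
        set mid := (lo + hi) / 2 with hmid
        have hml : lo ≤ mid := by omega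
        have hmh : mid < hi := by omega
        have hmlen : mid < es.length := by omega
        have hget : es.getD mid (0, 0) = es[mid]'hmlen := by
          rw [List.getD_eq_getElem?_getD, List.getElem?_eq_getElem hmlen]; rfl
        rw [hget]
        by_cases hp : p (es[mid]'hmlen).2 = true
        · simp only [hp, if_true]
          exact ih (mid + 1) hi (by omega) hhi (by omega)
            (fun k hk hk' => hmono k mid (by omega) hk' hmlen hp) hr
        · simp only [hp, if_false]
          refine ih lo mid (by omega) (by omega) hml hl (fun k hk hk' => ?_)
          cases hpk : p (es[k]'hk').2 with
          | false => rfl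
          | true => exact absurd (hmono mid k (by omega) hmlen hk' hpk) hp
      · simp only [pvBoundGo, h, if_false]
        have : lo = hi := by omega
        subst this
        refine ⟨by omega, fun k hk => ?_⟩
        by_cases hkl : k < lo
        · simp [hl k hkl hk, hkl]
        · simp [hr k (by omega) hk, hkl]

-- a filter characterised by an index window [r1, r2) is that drop/take window
lemma filter_eq_drop_take (l : List (Int × Int)) (q : Int × Int → Bool) (r1 r2 : Nat)
    (h : ∀ k, ∀ (hk : k < l.length), (q (l[k]'hk) = true ↔ (r1 ≤ k ∧ k < r2))) :
    l.filter q = (l.drop r1).take (r2 - r1) := by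
  induction l generalizing r1 r2 with
  | nil => simp
  | cons a t ih =>
      have h0 := h 0 (by simp)
      match r1, r2 with
      | 0, 0 =>
          have ha : q a = false := by
            cases hq : q a with
            | false => rfl
            | true => exact absurd (h0.mp hq) (by omega)
          have ht := ih 0 0 (fun k hk => by
            have := h (k + 1) (by simpa using Nat.succ_lt_succ hk)
            constructor
            · intro hq; exact absurd (this.mp hq) (by omega)
            · omega)
          simp only [List.filter_cons, ha, Bool.false_eq_true, if_false]
          simpa using ht
      | 0, s + 1 =>
          have ha : q a = true := h0.mpr (by omega)
          simp only [List.filter_cons, ha, if_true, List.drop_zero, Nat.sub_zero,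
            List.take_succ_cons]
          have := ih 0 s (fun k hk => by
            have := h (k + 1) (by simpa using Nat.succ_lt_succ hk)
            constructor
            · intro hq; have := this.mp hq; omega
            · intro hw; exact this.mpr (by omega))
          simpa using this
      | m + 1, r2 =>
          have ha : q a = false := by
            cases hq : q a with
            | false => rfl
            | true => exact absurd (h0.mp hq) (by omega)
          simp only [List.filter_cons, ha, Bool.false_eq_true, if_false, List.drop_succ_cons]
          have := ih m (r2 - 1) (fun k hk => by
            have := h (k + 1) (by simpa using Nat.succ_lt_succ hk)
            constructor
            · intro hq; have := this.mp hq; omega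
            · intro hw; exact this.mpr (by omega))
          rw [this]
          congr 1
          omega

-- projecting the values out of an index-filtered enumeration is filtering the values
lemma map_snd_filter_enum (fl : List Int) (s0 : Int) (g : Int → Bool) :
    ((PySem.List.enumerate fl s0).filter (fun t => g t.2)).map (fun t => t.2) = fl.filter g := by
  induction fl generalizing s0 with
  | nil => simp [PySem.List.enumerate]
  | cons a t ih =>
      rw [PySem.List.enumerate_cons]
      cases hg : g a <;> simp [hg, ih]

-- one frog's answer in B is the filter of the flies by reach, in original order
lemma B_frog (fl : List Int) (x s : Int) :
    (PySem.List.sorted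
        (PySem.List.slice (PySem.List.sorted (PySem.List.enumerate fl 0) (fun t => t.2) false)
          (some ((pvBoundGo (PySem.List.sorted (PySem.List.enumerate fl 0) (fun t => t.2) false)
            (fun v => decide (v < x - s))
            (PySem.List.sorted (PySem.List.enumerate fl 0) (fun t => t.2) false).length 0
            (PySem.List.sorted (PySem.List.enumerate fl 0) (fun t => t.2) false).length : Nat) : Int))
          (some ((pvBoundGo (PySem.List.sorted (PySem.List.enumerate fl 0) (fun t => t.2) false)
            (fun v => decide (v ≤ x + s))
            (PySem.List.sorted (PySem.List.enumerate fl 0) (fun t => t.2) false).length 0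
            (PySem.List.sorted (PySem.List.enumerate fl 0) (fun t => t.2) false).length : Nat) : Int)))
        (fun t => t.1) false).map (fun t => t.2)
      = fl.filter (fun v => decide (x - s ≤ v ∧ v ≤ x + s)) := by
  set es := PySem.List.sorted (PySem.List.enumerate fl 0) (fun t => t.2) false with hes
  have hmono : ∀ i j : Nat, i ≤ j → ∀ (hi' : i < es.length) (hj : j < es.length),
      (es[i]'hi').2 ≤ (es[j]'hj).2 := by
    intro i j hij hi' hj
    exact PySem.List.key_sorted_getElem_mono (PySem.List.enumerate fl 0) (fun t => t.2) hij hj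
  have hspec1 := pvBoundGo_go es (fun v => decide (v < x - s)) es.length 0 es.length
    (by omega) le_rfl (by omega) (by omega) (by intro k hk hk'; omega)
    (by intro i j hij hi' hj hp; simp only [decide_eq_true_eq] at *
        exact lt_of_le_of_lt (hmono i j hij hi' hj) hp)
  have hspec2 := pvBoundGo_go es (fun v => decide (v ≤ x + s)) es.length 0 es.length
    (by omega) le_rfl (by omega) (by omega) (by intro k hk hk'; omega)
    (by intro i j hij hi' hj hp; simp only [decide_eq_true_eq] at *
        exact le_trans (hmono i j hij hi' hj) hp)
  set r1 := pvBoundGo es (fun v => decide (v < x - s)) es.length 0 es.length with hr1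
  set r2 := pvBoundGo es (fun v => decide (v ≤ x + s)) es.length 0 es.length with hr2
  have hslice : PySem.List.slice es (some (r1 : Int)) (some (r2 : Int))
      = es.filter (fun t => decide (x - s ≤ t.2 ∧ t.2 ≤ x + s)) := by
    rw [PySem.List.slice_natCast]
    rw [filter_eq_drop_take es _ r1 r2 (fun k hk => by
      have h1 := hspec1.2 k hk
      have h2 := hspec2.2 k hk
      simp only [decide_eq_true_eq] at *
      omega)]
  rw [hslice]
  have hperm : ((PySem.List.enumerate fl 0).filter
      (fun t => decide (x - s ≤ t.2 ∧ t.2 ≤ x + s))).Perm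
      (es.filter (fun t => decide (x - s ≤ t.2 ∧ t.2 ≤ x + s))) :=
    (List.Perm.filter _ (PySem.List.sorted_perm (PySem.List.enumerate fl 0) (fun t => t.2) false)).symm
  have hpw : List.Pairwise (fun a b : Int × Int => a.1 < b.1)
      ((PySem.List.enumerate fl 0).filter (fun t => decide (x - s ≤ t.2 ∧ t.2 ≤ x + s))) :=
    List.Pairwise.filter _ (PySem.List.pairwise_lt_enumerate fl 0)
  rw [PySem.List.sorted_eq_of_perm_of_pairwise_lt _ _ (fun t => t.1) hperm hpw]
  exact map_snd_filter_enum fl 0 (fun v => decide (x - s ≤ v ∧ v ≤ x + s))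

-- B overall
lemma B_char (fp ts fl : List Int) :
    frogs_and_flies_alt fp ts fl
      = (fp.zip ts).map (fun p => fl.filter (fun v => decide (p.1 - p.2 ≤ v ∧ v ≤ p.1 + p.2))) := by
  unfold frogs_and_flies_alt
  rw [PySem.List.foldl_append_singleton_eq_map]
  simp only [List.nil_append]
  exact List.map_congr_left (fun p _ => B_frog fl p.1 p.2)

-- ===== VERDICT (by name: the statement is the Claim_ definition above) =====
theorem frogs_and_flies_spec : Claim_equal_frogs_and_flies := by
  intro fp ts fl _ hpre
  unfold Spec_frogs_and_flies
  rw [A_char fp ts fl hpre, B_char fp ts fl]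
  apply List.map_congr_left
  intro p _
  apply List.filter_congr
  intro fly _
  simp only [decide_eq_decide, abs_le]
  omega
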